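-- pv_equiv track=rewrite | github.com/Toothpastefairy/AoC-2024 | day7.py | isCombined
-- ===== SOURCE A (Python) =====
-- def isCombined(should_be, result, to_check, also_concat):
--     if len( to_check ) == 0:
--         return should_be == result
--
--     number = to_check.pop( 0 )
--
--     result1 = result * number
--     result2 = result + number
--     ret1    = isCombined ( should_be, result1, to_check[:], also_concat )
--     ret2    = isCombined ( should_be, result2, to_check[:], also_concat )
--     ret3    = False
--
--     if also_concat:
--         result3 = int( str( result ) + str( number ) )
--         ret3 = isCombined ( should_be, result3, to_check[:], also_concat )
--
--     return (ret1 or ret2 or ret3)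
-- ===== SOURCE B (Python) =====
-- def isCombined(should_be, result, to_check, also_concat):
--     vals = {result}
--     for number in to_check:
--         nxt = set()
--         for v in vals:
--             nxt.add(v * number)
--             nxt.add(v + number)
--             if also_concat:
--                 nxt.add(int(str(v) + str(number)))
--         vals = nxt
--     return should_be in vals
-- ===== Notes on version B (the rewrite author's own statement) =====
-- stated objective: alternative
-- what changed: Replaces A's naive triple recursion (which copies the remaining list at every node) by an iterative dynamic program: one left-to-right pass maintaining the SET of distinct reachable intermediate values, with a final membership test.
import Mathlib
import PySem

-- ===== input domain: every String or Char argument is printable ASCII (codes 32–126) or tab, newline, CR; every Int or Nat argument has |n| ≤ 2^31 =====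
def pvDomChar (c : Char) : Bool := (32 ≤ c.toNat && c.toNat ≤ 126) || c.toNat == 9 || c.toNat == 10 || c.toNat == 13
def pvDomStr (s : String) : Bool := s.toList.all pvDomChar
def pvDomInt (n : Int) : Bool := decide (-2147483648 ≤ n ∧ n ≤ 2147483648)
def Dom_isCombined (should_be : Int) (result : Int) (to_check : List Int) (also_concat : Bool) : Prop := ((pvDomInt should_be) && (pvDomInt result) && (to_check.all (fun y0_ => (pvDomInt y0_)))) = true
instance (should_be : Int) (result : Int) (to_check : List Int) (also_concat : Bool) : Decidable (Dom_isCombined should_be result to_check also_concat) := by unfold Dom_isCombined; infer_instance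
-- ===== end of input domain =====

-- B replaces A's naive triple recursion by one iterative pass over a set of distinct
-- reachable intermediate values (alternative decomposition; return-value equivalence only:
-- Python A pops the first element of to_check, a mutation B does not perform).

-- ===== PORT A =====
-- int(str(x) + str(y)); .getD 0 is never reached inside Pre_ (int() raises exactly when y < 0)
def pyIntCat (x y : Int) : Int :=
  (PySem.Int.ofChars? (PySem.Int.toChars x ++ PySem.Int.toChars y)).getD 0

def isCombined (should_be : Int) (result : Int) (to_check : List Int) (also_concat : Bool) : Bool :=
  match to_check with
  | [] => should_be == result
  | number :: rest =>
    let result1 := result * number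
    let result2 := result + number
    let ret1 := isCombined should_be result1 rest also_concat
    let ret2 := isCombined should_be result2 rest also_concat
    let ret3 := if also_concat then
        let result3 := pyIntCat result number
        isCombined should_be result3 rest also_concat
      else false
    ret1 || ret2 || ret3

-- ===== PORT B =====
-- one level of the DP: all values reachable from some v ∈ vals using `number` once
def stepVals (also_concat : Bool) (vals : PySem.Set Int) (number : Int) : PySem.Set Int :=
  vals.foldl (fun nxt v =>
    let nxt := PySem.Set.add nxt (v * number)
    let nxt := PySem.Set.add nxt (v + number)
    if also_concat then PySem.Set.add nxt (pyIntCat v number) else nxt)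
    PySem.Set.empty

def isCombined_alt (should_be : Int) (result : Int) (to_check : List Int) (also_concat : Bool) : Bool :=
  let vals := to_check.foldl (stepVals also_concat) (PySem.Set.ofList [result])
  PySem.Set.contains vals should_be

-- ===== PRECONDITION & SPEC =====
-- Pre_ excludes exactly the inputs on which Python A raises ValueError: also_concat set while
-- some list element is negative, so int(str(result) + str(number)) sees '-' mid-string (B raises there too).
def Pre_isCombined (should_be : Int) (result : Int) (to_check : List Int) (also_concat : Bool) : Prop :=
  also_concat = true → ∀ n ∈ to_check, 0 ≤ n
instance (should_be : Int) (result : Int) (to_check : List Int) (also_concat : Bool) : Decidable (Pre_isCombined should_be result to_check also_concat) := by unfold Pre_isCombined; infer_instance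

def pvWitness_isCombined : Int × Int × List Int × Bool := (10, 1, [2, 5], true)

def Spec_isCombined (should_be : Int) (result : Int) (to_check : List Int) (also_concat : Bool) (out : Bool) : Prop := out = isCombined_alt should_be result to_check also_concat
instance (should_be : Int) (result : Int) (to_check : List Int) (also_concat : Bool) (out : Bool) : Decidable (Spec_isCombined should_be result to_check also_concat out) := by unfold Spec_isCombined; infer_instance

-- ===== CLAIM (what is proved, stated in full; the proofs are below) =====
def Claim_equal_isCombined : Prop := ∀ (should_be : Int) (result : Int) (to_check : List Int) (also_concat : Bool), Dom_isCombined should_be result to_check also_concat → Pre_isCombined should_be result to_check also_concat → Spec_isCombined should_be result to_check also_concat (isCombined should_be result to_check also_concat)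

-- ===== LEMMAS AND PROOFS =====

-- membership in the inner fold of one DP level
lemma mem_stepVals_aux (c : Bool) (n w : Int) : ∀ (l : List Int) (acc : PySem.Set Int),
    w ∈ l.foldl (fun nxt v =>
      let nxt := PySem.Set.add nxt (v * n)
      let nxt := PySem.Set.add nxt (v + n)
      if c then PySem.Set.add nxt (pyIntCat v n) else nxt) acc
    ↔ w ∈ acc ∨ ∃ v ∈ l, w = v * n ∨ w = v + n ∨ (c = true ∧ w = pyIntCat v n) := by
  intro l
  induction l with
  | nil => simp
  | cons v l ih =>
    intro acc
    simp only [List.foldl_cons, ih]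
    cases c <;> simp [PySem.Set.mem_add] <;> aesop

-- membership in one DP level
lemma mem_stepVals (c : Bool) (S : PySem.Set Int) (n w : Int) :
    w ∈ stepVals c S n ↔ ∃ v ∈ S, w = v * n ∨ w = v + n ∨ (c = true ∧ w = pyIntCat v n) := by
  unfold stepVals
  rw [mem_stepVals_aux]
  simp [PySem.Set.empty]

-- the DP accumulator characterises A's recursion
lemma dp_char (sb : Int) (c : Bool) : ∀ (xs : List Int) (S : PySem.Set Int),
    PySem.Set.contains (xs.foldl (stepVals c) S) sb = true
    ↔ ∃ v ∈ S, isCombined sb v xs c = true := by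
  intro xs
  induction xs with
  | nil =>
    intro S
    rw [PySem.Set.contains_iff]
    simp only [isCombined, beq_iff_eq]
    constructor
    · intro h; exact ⟨sb, h, rfl⟩
    · rintro ⟨v, hv, rfl⟩; exact hv
  | cons n rest ih =>
    intro S
    simp only [List.foldl_cons, ih, mem_stepVals]
    simp only [isCombined, Bool.or_eq_true]
    cases c <;> simp <;> aesop

-- ===== VERDICT (by name: the statement is the Claim_ definition above) =====
theorem isCombined_spec : Claim_equal_isCombined := by
  intro sb r xs c _ _
  unfold Spec_isCombined isCombined_alt
  have h := dp_char sb c xs (PySem.Set.ofList [r])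
  cases hA : isCombined sb r xs c with
  | true =>
    exact (h.2 ⟨r, by simp [PySem.Set.mem_ofList], hA⟩).symm
  | false =>
    cases hB : PySem.Set.contains (xs.foldl (stepVals c) (PySem.Set.ofList [r])) sb with
    | false => rfl
    | true =>
      rcases h.1 hB with ⟨v, hv, hrec⟩
      simp [PySem.Set.mem_ofList] at hv
      subst hv
      rw [hA] at hrec
      cases hrec
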